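-- pv_equiv track=rewrite | github.com/ykosuru/tal-ast | talparser.py | _has_unbalanced_parentheses
-- ===== SOURCE A (Python) =====
-- def _has_unbalanced_parentheses(text: str) -> bool:
--     """
--     Check if text has unbalanced parentheses, indicating it continues on next line.
--     Properly handles nested parentheses and quoted strings.
--     """
--     paren_count = 0
--     in_quotes = False
--     quote_char = None
--
--     for i, char in enumerate(text):
--         # Handle quotes
--         if char in '"\'':
--             if not in_quotes:
--                 in_quotes = True
--                 quote_char = char
--             elif char == quote_char and (i == 0 or text[i-1] != '\\'):
--                 in_quotes = False
--                 quote_char = None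
--
--         # Count parentheses only when not in quotes
--         elif not in_quotes:
--             if char == '(':
--                 paren_count += 1
--             elif char == ')':
--                 paren_count -= 1
--
--     return paren_count != 0
-- ===== SOURCE B (Python) =====
-- def _has_unbalanced_parentheses(text: str) -> bool:
--     """Segment decomposition: repeatedly split off the quote-free head, count its
--     parentheses with str.count, then drop the quoted span and continue on the rest."""
--     diff = 0
--     s = text
--     while True:
--         j = _next_quote(s)
--         if j == -1:
--             diff += s.count('(') - s.count(')')
--             return diff != 0
--         head, q, tail = s[:j], s[j], s[j + 1:]
--         diff += head.count('(') - head.count(')')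
--         s = _skip_quoted(tail, q, q)
--
--
-- def _next_quote(s: str) -> int:
--     """Index of the first quote character in s, or -1."""
--     for j, c in enumerate(s):
--         if c in '"\'':
--             return j
--     return -1
--
--
-- def _skip_quoted(s: str, q: str, prev: str) -> str:
--     """s is the text just after an opening quote q; return the text after the
--     closing quote (same char, not preceded by a backslash), or ''."""
--     for k, c in enumerate(s):
--         if c == q and prev != '\\':
--             return s[k + 1:]
--         prev = c
--     return ''
-- ===== Notes on version B (the rewrite author's own statement) =====
-- stated objective: alternative
-- what changed: B replaces A's fused per-character state machine (paren counter updated inside the quote-tracking loop) by a segment loop on a shrinking string: find the next quote, add the difference of the open/close paren counts of the quote-free head via str.count, skip the quoted span with its escape rule, and repeat on the remainder.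
import Mathlib
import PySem

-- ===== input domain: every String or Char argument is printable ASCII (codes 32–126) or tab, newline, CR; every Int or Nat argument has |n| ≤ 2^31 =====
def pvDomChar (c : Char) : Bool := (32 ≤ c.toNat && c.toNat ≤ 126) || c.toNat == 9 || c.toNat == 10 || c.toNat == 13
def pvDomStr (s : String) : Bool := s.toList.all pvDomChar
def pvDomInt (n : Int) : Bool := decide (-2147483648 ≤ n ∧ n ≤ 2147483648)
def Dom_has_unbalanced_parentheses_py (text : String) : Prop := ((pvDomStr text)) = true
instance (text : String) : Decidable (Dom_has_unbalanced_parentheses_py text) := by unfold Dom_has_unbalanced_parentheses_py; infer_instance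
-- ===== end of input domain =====

-- B replaces A's fused per-character counter/state machine by a segment loop: split off the
-- quote-free head, count its parentheses with count, skip the quoted span, repeat
-- (alternative decomposition; a timing run measured B faster on random inputs).

-- ===== PORT A =====
-- one step of A's for-loop over enumerate(text); state = (paren_count, in_quotes, quote_char)
def pvStepA (txt : List Char) (st : Int × Bool × Option Char) (p : Int × Char) : Int × Bool × Option Char :=
  let pc := st.1; let inq := st.2.1; let qc := st.2.2
  let i := p.1; let c := p.2
  if c = '"' ∨ c = '\'' then
    if ¬ inq then (pc, true, some c)
    else if some c = qc ∧ (i = 0 ∨ PySem.List.pyGet? txt (i - 1) ≠ some '\\') then (pc, false, none)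
    else st
  else if ¬ inq then
    if c = '(' then (pc + 1, inq, qc)
    else if c = ')' then (pc - 1, inq, qc)
    else st
  else st

def has_unbalanced_parentheses_py (text : String) : Bool :=
  let txt := text.toList
  let st := (PySem.List.enumerate txt).foldl (pvStepA txt) (0, false, none)
  st.1 != 0

-- ===== PORT B =====
-- Source B's _next_quote: index of the first quote character, or -1 (j is the running index)
def pvNextQuote : List Char → Int → Int
  | [], _ => -1
  | c :: rest, j => if c = '"' ∨ c = '\'' then j else pvNextQuote rest (j + 1)

-- Source B's _skip_quoted: text after the closing quote (s[k+1:] at the found k is the cons tail)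
def pvSkipQuoted : List Char → Char → Char → List Char
  | [], _, _ => []
  | c :: rest, q, prev => if c = q ∧ prev ≠ '\\' then rest else pvSkipQuoted rest q c

-- termination facts for the while loop (cited by decreasing_by)
lemma pvSkipQuoted_length_le : ∀ (s : List Char) (q p : Char), (pvSkipQuoted s q p).length ≤ s.length := by
  intro s
  induction s with
  | nil => intro q p; simp [pvSkipQuoted]
  | cons c rest ih =>
    intro q p
    by_cases h : c = q ∧ p ≠ '\\'
    · simp [pvSkipQuoted, h]
    · simp only [pvSkipQuoted, if_neg h, List.length_cons]
      exact le_trans (ih q c) (Nat.le_succ _)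

lemma pvNextQuote_nonneg : ∀ (s : List Char) (j0 : Int), 0 ≤ j0 →
    pvNextQuote s j0 = -1 ∨ j0 ≤ pvNextQuote s j0 := by
  intro s
  induction s with
  | nil => intro j0 _; left; rfl
  | cons c rest ih =>
    intro j0 h0
    by_cases h : c = '"' ∨ c = '\''
    · right; simp [pvNextQuote, h]
    · simp only [pvNextQuote, if_neg h]
      rcases ih (j0 + 1) (by omega) with h1 | h1
      · left; exact h1
      · right; omega

-- Source B's while loop; diff is the running count difference, s the remaining text
def pvLoopB (diff : Int) (s : List Char) : Bool :=
  if hj : pvNextQuote s 0 = -1 then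
    (diff + (PySem.List.count s '(' : Int) - (PySem.List.count s ')' : Int)) != 0
  else
    match hq : PySem.List.pyGet? s (pvNextQuote s 0) with
    | none => diff != 0   -- unreachable: pvNextQuote found a valid index into s
    | some q =>
      pvLoopB
        (diff + (PySem.List.count (PySem.List.slice s none (some (pvNextQuote s 0))) '(' : Int)
              - (PySem.List.count (PySem.List.slice s none (some (pvNextQuote s 0))) ')' : Int))
        (pvSkipQuoted (PySem.List.slice s (some (pvNextQuote s 0 + 1)) none) q q)
termination_by s.length
decreasing_by
  have hj0 : 0 ≤ pvNextQuote s 0 := by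
    rcases pvNextQuote_nonneg s 0 (by omega) with h | h
    · exact absurd h hj
    · exact h
  have hs : s ≠ [] := by
    intro h; subst h; simp [PySem.List.pyGet?] at hq
  have h1 : (PySem.List.slice s (some (pvNextQuote s 0 + 1)) none) = s.drop (pvNextQuote s 0 + 1).toNat :=
    PySem.List.slice_from s (by omega)
  have h2 := pvSkipQuoted_length_le (PySem.List.slice s (some (pvNextQuote s 0 + 1)) none) q q
  rw [h1] at h2 ⊢
  have h3 : 0 < s.length := List.length_pos_of_ne_nil hs
  have h4 : 1 ≤ (pvNextQuote s 0 + 1).toNat := by omega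
  have h5 : (s.drop (pvNextQuote s 0 + 1).toNat).length = s.length - (pvNextQuote s 0 + 1).toNat := by
    simp
  omega

def has_unbalanced_parentheses_py_alt (text : String) : Bool :=
  pvLoopB 0 text.toList

-- ===== PRECONDITION & SPEC =====
def Spec_has_unbalanced_parentheses_py (text : String) (out : Bool) : Prop := out = has_unbalanced_parentheses_py_alt text
instance (text : String) (out : Bool) : Decidable (Spec_has_unbalanced_parentheses_py text out) := by unfold Spec_has_unbalanced_parentheses_py; infer_instance

-- ===== CLAIM (what is proved, stated in full; the proofs are below) =====
def Claim_equal_has_unbalanced_parentheses_py : Prop := ∀ (text : String), Dom_has_unbalanced_parentheses_py text → Spec_has_unbalanced_parentheses_py text (has_unbalanced_parentheses_py text)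

-- ===== LEMMAS AND PROOFS =====

-- reference state machine: the characters outside quoted strings (proof-only normal form)
def pvOutside : List Char → Bool → Option Char → Option Char → List Char
  | [], _, _, _ => []
  | c :: rest, inq, qc, prev =>
    if c = '"' ∨ c = '\'' then
      if ¬ inq then pvOutside rest true (some c) (some c)
      else if some c = qc ∧ prev ≠ some '\\' then pvOutside rest false none (some c)
      else pvOutside rest inq qc (some c)
    else if ¬ inq then c :: pvOutside rest inq qc (some c)
    else pvOutside rest inq qc (some c)

-- counts through a cons, as integers
lemma pv_count_cons (c a : Char) (s : List Char) :
    ((c :: s).count a : Int) = (s.count a : Int) + (if c = a then 1 else 0) := by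
  by_cases h : c = a
  · simp [h]
  · simp [h]

-- ===== A-side: A's fold computes the paren-count difference of pvOutside =====
lemma pvFoldA_eq (txt : List Char) :
    ∀ (ys : List Char) (k : Nat) (pc : Int) (inq : Bool) (qc prev : Option Char),
      txt.drop k = ys →
      (((k : Int) = 0 ∨ PySem.List.pyGet? txt ((k : Int) - 1) ≠ some '\\') ↔ prev ≠ some '\\') →
      ((PySem.List.enumerate ys (k : Int)).foldl (pvStepA txt) (pc, inq, qc)).1
        = pc + ((pvOutside ys inq qc prev).count '(' : Int)
             - ((pvOutside ys inq qc prev).count ')' : Int) := by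
  intro ys
  induction ys with
  | nil => intro k pc inq qc prev _ _; simp [PySem.List.enumerate, pvOutside]
  | cons c rest ih =>
    intro k pc inq qc prev hdrop hiff
    have hget : txt[k]? = some c := by
      have := congrArg (fun l => l.head?) hdrop
      simpa [List.head?_drop] using this
    have hdrop' : txt.drop (k + 1) = rest := by
      have h1 : txt.drop (k + 1) = (txt.drop k).drop 1 := by rw [List.drop_drop]
      rw [h1, hdrop]; rfl
    have hpg : PySem.List.pyGet? txt ((k : Nat) : Int) = some c := by
      rw [PySem.List.pyGet?_natCast, hget]
    have hnext : (((k + 1 : Nat) : Int) = 0 ∨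
        PySem.List.pyGet? txt (((k + 1 : Nat) : Int) - 1) ≠ some '\\') ↔
        (some c ≠ some '\\') := by
      have hk0 : ¬ (((k + 1 : Nat) : Int) = 0) := by push_cast; omega
      have h1 : (((k + 1 : Nat) : Int) - 1) = ((k : Nat) : Int) := by push_cast; ring
      rw [h1, hpg]
      constructor
      · rintro (h | h)
        · exact absurd h hk0
        · exact h
      · intro h; exact Or.inr h
    have ih' := fun pc inq qc => ih (k + 1) pc inq qc (some c) hdrop' hnext
    have hcast : (((k + 1 : Nat) : Int)) = (k : Int) + 1 := by push_cast; ring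
    rw [hcast] at ih'
    rw [PySem.List.enumerate_cons, List.foldl_cons]
    by_cases hq : c = '"' ∨ c = '\''
    · cases inq with
      | false =>
        simp only [pvStepA, pvOutside]
        rw [if_pos hq, if_pos (by decide), if_pos hq, if_pos (by decide)]
        exact ih' pc true (some c)
      | true =>
        by_cases hcl : some c = qc ∧ prev ≠ some '\\'
        · have hclA : some c = qc ∧ ((k : Int) = 0 ∨ PySem.List.pyGet? txt ((k : Int) - 1) ≠ some '\\') :=
            ⟨hcl.1, hiff.mpr hcl.2⟩
          simp only [pvStepA, pvOutside]
          rw [if_pos hq, if_neg (by decide), if_pos hclA, if_pos hq, if_neg (by decide), if_pos hcl]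
          exact ih' pc false none
        · have hclA : ¬ (some c = qc ∧ ((k : Int) = 0 ∨ PySem.List.pyGet? txt ((k : Int) - 1) ≠ some '\\')) := by
            intro h; exact hcl ⟨h.1, hiff.mp h.2⟩
          simp only [pvStepA, pvOutside]
          rw [if_pos hq, if_neg (by decide), if_neg hclA, if_pos hq, if_neg (by decide), if_neg hcl]
          exact ih' pc true qc
    · cases inq with
      | true =>
        simp only [pvStepA, pvOutside]
        rw [if_neg hq, if_neg (by decide), if_neg hq, if_neg (by decide)]
        exact ih' pc true qc
      | false =>
        simp only [pvStepA, pvOutside]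
        rw [if_neg hq, if_pos (show (¬ false = true) by decide), if_neg hq,
            if_pos (show (¬ false = true) by decide)]
        rw [pv_count_cons, pv_count_cons]
        by_cases hp : c = '('
        · rw [if_pos hp, ih' (pc + 1) false qc]
          simp [hp]
          ring
        · by_cases hp2 : c = ')'
          · rw [if_neg hp, if_pos hp2, ih' (pc - 1) false qc]
            simp [hp2]
            ring
          · rw [if_neg hp, if_neg hp2, ih' pc false qc]
            simp [hp, hp2]

-- ===== B-side lemmas =====

-- outside quotes, the carried quote_char and prev are irrelevant to pvOutside
lemma pvOutside_false_irrel : ∀ (s : List Char) (q1 p1 q2 p2 : Option Char),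
    pvOutside s false q1 p1 = pvOutside s false q2 p2 := by
  intro s
  induction s with
  | nil => intro q1 p1 q2 p2; rfl
  | cons c rest ih =>
    intro q1 p1 q2 p2
    by_cases h : c = '"' ∨ c = '\''
    · simp only [pvOutside, if_pos h, if_pos (show (¬ false = true) by decide)]
    · simp only [pvOutside, if_neg h, if_pos (show (¬ false = true) by decide)]
      rw [ih _ (some c) q2 (some c)]

-- skipping a quoted span: pvOutside emits nothing until the closing quote
lemma pvOutside_skip : ∀ (s : List Char) (q p : Char), (q = '"' ∨ q = '\'') →
    pvOutside s true (some q) (some p) = pvOutside (pvSkipQuoted s q p) false none none := by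
  intro s
  induction s with
  | nil => intro q p _; rfl
  | cons c rest ih =>
    intro q p hq
    by_cases hcl : c = q ∧ p ≠ '\\'
    · have hcq : c = '"' ∨ c = '\'' := by rw [hcl.1]; exact hq
      have hcl' : some c = some q ∧ some p ≠ some '\\' := ⟨by rw [hcl.1], by simpa using hcl.2⟩
      simp only [pvOutside, pvSkipQuoted, if_pos hcq, if_pos hcl, if_pos hcl']
      exact pvOutside_false_irrel rest none (some c) none none
    · have hcl' : ¬ (some c = some q ∧ some p ≠ some '\\') := by
        intro h; exact hcl ⟨Option.some_inj.mp h.1, by simpa using h.2⟩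
      by_cases hcq : c = '"' ∨ c = '\''
      · simp only [pvOutside, pvSkipQuoted, if_pos hcq, if_neg hcl, if_neg hcl']
        exact ih q c hq
      · simp only [pvOutside, pvSkipQuoted, if_neg hcq, if_neg hcl]
        exact ih q c hq

-- a quote-free prefix passes through pvOutside unchanged
lemma pvOutside_head : ∀ (head rest : List Char) (qc p : Option Char),
    (∀ c ∈ head, ¬ (c = '"' ∨ c = '\'')) →
    pvOutside (head ++ rest) false qc p = head ++ pvOutside rest false none none := by
  intro head
  induction head with
  | nil => intro rest qc p _; simp [pvOutside_false_irrel rest qc p none none]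
  | cons c h' ih =>
    intro rest qc p hfree
    have hc : ¬ (c = '"' ∨ c = '\'') := hfree c (List.mem_cons_self ..)
    simp only [List.cons_append, pvOutside, if_neg hc, if_pos (show (¬ false = true) by decide)]
    rw [ih rest qc (some c) (fun d hd => hfree d (List.mem_cons_of_mem _ hd))]

-- pvNextQuote = -1 means no quote at all
lemma pvNextQuote_none : ∀ (s : List Char) (j0 : Int), 0 ≤ j0 → pvNextQuote s j0 = -1 →
    ∀ (qc p : Option Char), pvOutside s false qc p = s := by
  intro s
  induction s with
  | nil => intro j0 _ _ qc p; rfl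
  | cons c rest ih =>
    intro j0 h0 hnq qc p
    by_cases h : c = '"' ∨ c = '\''
    · exfalso; simp only [pvNextQuote, if_pos h] at hnq; omega
    · simp only [pvNextQuote, if_neg h] at hnq
      simp only [pvOutside, if_neg h, if_pos (show (¬ false = true) by decide)]
      rw [ih (j0 + 1) (by omega) hnq]

-- pvNextQuote found: s splits as quote-free head ++ quote ++ tail
lemma pvNextQuote_some : ∀ (s : List Char) (j0 : Int), 0 ≤ j0 → pvNextQuote s j0 ≠ -1 →
    ∃ head q tail, s = head ++ q :: tail ∧ (head.length : Int) + j0 = pvNextQuote s j0 ∧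
      (q = '"' ∨ q = '\'') ∧ (∀ c ∈ head, ¬ (c = '"' ∨ c = '\'')) := by
  intro s
  induction s with
  | nil => intro j0 _ h; exact absurd rfl h
  | cons c rest ih =>
    intro j0 h0 hnq
    by_cases h : c = '"' ∨ c = '\''
    · exact ⟨[], c, rest, by simp, by simp [pvNextQuote, h], h, by simp⟩
    · simp only [pvNextQuote, if_neg h] at hnq ⊢
      obtain ⟨head, q, tail, hs, hlen, hq, hfree⟩ := ih (j0 + 1) (by omega) hnq
      refine ⟨c :: head, q, tail, by rw [hs]; rfl, ?_, hq, ?_⟩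
      · simp only [List.length_cons]
        push_cast at hlen ⊢
        omega
      · intro d hd
        rcases List.mem_cons.mp hd with h1 | h1
        · exact h1 ▸ h
        · exact hfree d h1

-- the B loop computes the paren-count difference of pvOutside
lemma pvLoopB_eq : ∀ (n : Nat) (s : List Char) (diff : Int), s.length ≤ n →
    pvLoopB diff s = ((diff + ((pvOutside s false none none).count '(' : Int)
      - ((pvOutside s false none none).count ')' : Int)) != 0) := by
  intro n
  induction n with
  | zero =>
    intro s diff hlen
    have hnil : s = [] := List.eq_nil_of_length_eq_zero (by omega)
    subst hnil
    rw [pvLoopB]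
    simp [pvNextQuote, pvOutside, PySem.List.count_eq]
  | succ n ih =>
    intro s diff hlen
    by_cases hnq : pvNextQuote s 0 = -1
    · rw [pvLoopB, dif_pos hnq, pvNextQuote_none s 0 (by omega) hnq none none,
        PySem.List.count_eq, PySem.List.count_eq]
    · obtain ⟨head, q, tail, hs, hlen0, hq, hfree⟩ := pvNextQuote_some s 0 (by omega) hnq
      have hj : pvNextQuote s 0 = (head.length : Int) := by omega
      have hget : PySem.List.pyGet? s (pvNextQuote s 0) = some q := by
        rw [hj, hs]; exact PySem.List.pyGet?_append_length head tail q
      have hhead : PySem.List.slice s none (some (pvNextQuote s 0)) = head := by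
        rw [hj, PySem.List.slice_to_natCast, hs, List.take_left]
      have htail : PySem.List.slice s (some (pvNextQuote s 0 + 1)) none = tail := by
        have : pvNextQuote s 0 + 1 = ((head.length + 1 : Nat) : Int) := by push_cast; omega
        rw [this, PySem.List.slice_from_natCast, hs]
        have h2 : head ++ q :: tail = (head ++ [q]) ++ tail := by simp
        rw [h2]
        exact List.drop_left' (by simp)
      have hout : pvOutside s false none none
          = head ++ pvOutside (pvSkipQuoted tail q q) false none none := by
        rw [hs, pvOutside_head head (q :: tail) none none hfree]
        have hstep : pvOutside (q :: tail) false none none = pvOutside tail true (some q) (some q) := by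
          simp only [pvOutside, if_pos hq, if_pos (by decide : ¬ false = true)]
        rw [hstep, pvOutside_skip tail q q hq]
      have hlen' : (pvSkipQuoted tail q q).length ≤ n := by
        have h1 := pvSkipQuoted_length_le tail q q
        have h2 : s.length = head.length + 1 + tail.length := by rw [hs]; simp; omega
        omega
      rw [pvLoopB, dif_neg hnq]
      have hred : (match hq' : PySem.List.pyGet? s (pvNextQuote s 0) with
          | none => diff != 0
          | some q =>
            pvLoopB
              (diff + (PySem.List.count (PySem.List.slice s none (some (pvNextQuote s 0))) '(' : Int)
                    - (PySem.List.count (PySem.List.slice s none (some (pvNextQuote s 0))) ')' : Int))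
              (pvSkipQuoted (PySem.List.slice s (some (pvNextQuote s 0 + 1)) none) q q))
          = pvLoopB
              (diff + (PySem.List.count head '(' : Int) - (PySem.List.count head ')' : Int))
              (pvSkipQuoted tail q q) := by
        rw [hhead, htail]
        split
        · next h => rw [hget] at h; exact absurd h (by simp)
        · next q' h =>
          rw [hget] at h
          cases h
          rfl
      rw [hred, ih _ _ hlen', hout]
      have hc : ∀ a : Char, ((head ++ pvOutside (pvSkipQuoted tail q q) false none none).count a : Int)
          = (head.count a : Int) + ((pvOutside (pvSkipQuoted tail q q) false none none).count a : Int) := by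
        intro a; rw [List.count_append]; push_cast; ring
      rw [hc, hc, PySem.List.count_eq, PySem.List.count_eq]
      congr 1
      ring

-- ===== VERDICT (by name: the statement is the Claim_ definition above) =====
theorem has_unbalanced_parentheses_py_spec : Claim_equal_has_unbalanced_parentheses_py := by
  intro text _
  unfold Spec_has_unbalanced_parentheses_py has_unbalanced_parentheses_py has_unbalanced_parentheses_py_alt
  have hA := pvFoldA_eq text.toList text.toList 0 0 false none none (by simp) (by simp)
  simp only [Nat.cast_zero] at hA
  have hB := pvLoopB_eq text.toList.length text.toList 0 (le_refl _)
  simp only [hA, hB]
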